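-- pv_equiv track=rewrite | github.com/Stannie04/mgaia3 | new_WFC/fill_tiles.py | find_furthest_walkable_pair
-- ===== SOURCE A (Python) =====
-- from collections import deque
--
-- def find_furthest_walkable_pair(output):
--     """
--     Find the two furthest walkable tiles ('.') in the output grid.
--     Returns their coordinates and the distance between them.
--     """
--     height, width = len(output), len(output[0])
--     # Find all walkable tiles
--     walkable = [(y, x) for y in range(height) for x in range(width) if output[y][x] == '.']
--
--     max_pair = None
--     max_dist = -1
--
--     for i, (sy, sx) in enumerate(walkable):
--         dist_map = [[-1]*width for _ in range(height)]
--         dist_map[sy][sx] = 0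
--         queue = deque([(sy, sx)])
--
--         # BFS to find the furthest tile from (sy, sx)
--         while queue:
--             y, x = queue.popleft()
--             for dy, dx in [(-1,0), (1,0), (0,-1), (0,1)]:
--                 ny, nx = y+dy, x+dx
--                 if 0 <= ny < height and 0 <= nx < width and output[ny][nx] == '.' and dist_map[ny][nx] == -1:
--                     dist_map[ny][nx] = dist_map[y][x] + 1
--                     queue.append((ny, nx))
--         # Find the furthest tile from (sy, sx)
--         for ey, ex in walkable[i+1:]:
--             d = dist_map[ey][ex]
--             if d > max_dist:
--                 max_dist = d
--                 max_pair = ((sy, sx), (ey, ex), d)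
--
--     return max_pair
-- ===== SOURCE B (Python) =====
-- def find_furthest_walkable_pair(output):
--     """
--     Find the two furthest walkable tiles ('.') in the output grid.
--     Returns their coordinates and the distance between them.
--     """
--     height, width = len(output), len(output[0])
--     walkable = [(y, x) for y in range(height) for x in range(width) if output[y][x] == '.']
--
--     max_pair = None
--     max_dist = -1
--
--     for i, (sy, sx) in enumerate(walkable):
--         # Level-synchronized BFS: expand whole frontiers, keep only discovered
--         # distances in a dict instead of a full matrix.
--         dist = {(sy, sx): 0}
--         frontier = [(sy, sx)]
--         while frontier:
--             nxt = []
--             for (y, x) in frontier: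
--                 for (ny, nx) in ((y - 1, x), (y + 1, x), (y, x - 1), (y, x + 1)):
--                     if 0 <= ny < height and 0 <= nx < width \
--                             and output[ny][nx] == '.' and (ny, nx) not in dist:
--                         dist[(ny, nx)] = dist[(y, x)] + 1
--                         nxt.append((ny, nx))
--             frontier = nxt
--         for (ey, ex) in walkable[i + 1:]:
--             d = dist.get((ey, ex), -1)
--             if d > max_dist:
--                 max_dist = d
--                 max_pair = ((sy, sx), (ey, ex), d)
--
--     return max_pair
-- ===== Notes on version B (the rewrite author's own statement) =====
-- stated objective: alternative
-- what changed: A's per-source BFS with a FIFO deque over a full height-x-width distance matrix is replaced by a level-synchronized frontier expansion that keeps only the discovered distances in a dict keyed by coordinates; the pair scan then reads dict.get with default -1 instead of matrix cells.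
import Mathlib
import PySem

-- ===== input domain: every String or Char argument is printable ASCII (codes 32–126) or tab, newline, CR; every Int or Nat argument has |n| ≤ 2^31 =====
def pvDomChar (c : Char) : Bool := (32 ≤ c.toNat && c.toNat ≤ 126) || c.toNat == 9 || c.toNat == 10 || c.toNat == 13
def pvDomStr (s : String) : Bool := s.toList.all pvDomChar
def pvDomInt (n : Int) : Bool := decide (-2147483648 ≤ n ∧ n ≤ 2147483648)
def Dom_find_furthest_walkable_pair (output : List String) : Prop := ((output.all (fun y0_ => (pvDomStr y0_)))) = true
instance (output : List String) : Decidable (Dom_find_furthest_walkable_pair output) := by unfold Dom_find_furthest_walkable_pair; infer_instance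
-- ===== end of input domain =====

-- B replaces A's per-source FIFO-queue BFS over a full height×width distance matrix by a
-- level-synchronized frontier BFS that keeps only the discovered distances in a dict
-- (objective: alternative — same asymptotic cost, different traversal bookkeeping).

-- ---- helpers shared by both ports (both Pythons compute these identically) ----

-- len(output[0]) — the .getD 0 default is only reached when output = [], which Pre_ excludes (Python raises IndexError)
def pvWidth (output : List String) : Int :=
  ((PySem.List.pyGet? output 0).map (fun r => PySem.Str.len r)).getD 0

-- output[y][x] (none where Python would raise; only evaluated under 0 ≤ y < height, 0 ≤ x < width)
def pvCell (output : List String) (y x : Int) : Option Char :=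
  (PySem.List.pyGet? output y).bind (fun r => PySem.Str.pyGet? r x)

-- [(y, x) for y in range(h) for x in range(w) if output[y][x] == '.'] for given bounds h, w
def pvWalkableHW (output : List String) (h w : Int) : List (Int × Int) :=
  (PySem.List.pyRange 0 h 1).flatMap (fun y =>
    ((PySem.List.pyRange 0 w 1).filter
      (fun x => pvCell output y x == some '.')).map (fun x => (y, x)))

-- [(y, x) for y in range(height) for x in range(width) if output[y][x] == '.']
def pvWalkable (output : List String) : List (Int × Int) :=
  pvWalkableHW output (output.length : Int) (pvWidth output)

-- ===== PORT A =====

-- dist_map[y][x] read / write (row-major list of lists; indices are checked nonneg before use)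
def pvGet2 (dm : List (List Int)) (y x : Nat) : Option Int :=
  (dm[y]?).bind (fun r => r[x]?)

def pvSet2 (dm : List (List Int)) (y x : Nat) (v : Int) : List (List Int) :=
  dm.modify y (fun r => r.set x v)

def pvNbrs : List (Int × Int) := [(-1, 0), (1, 0), (0, -1), (0, 1)]

-- every value stored in dist_map is ≥ -1; decidable, checked only so the BFS recursion is
-- well-founded (the check always succeeds in a real run and changes no computed value)
def pvInvA (dm : List (List Int)) : Prop :=
  ∀ r ∈ dm, ∀ v ∈ r, (-1 : Int) ≤ v

theorem pvInvA_get {dm : List (List Int)} (hinv : pvInvA dm) {y x : Nat} {v : Int}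
    (h : pvGet2 dm y x = some v) : -1 ≤ v := by
  unfold pvGet2 at h
  cases hdm : dm[y]? with
  | none => rw [hdm] at h; simp at h
  | some r =>
    rw [hdm] at h
    simp only [Option.bind_some] at h
    exact hinv r (List.mem_of_getElem? hdm) v (List.mem_of_getElem? h)

theorem pvInvA_set2 {dm : List (List Int)} (hinv : pvInvA dm) {y x : Nat} {v : Int}
    (hv : -1 ≤ v) : pvInvA (pvSet2 dm y x v) := by
  intro r hr u hu
  unfold pvSet2 at hr
  obtain ⟨i, hi⟩ := List.mem_iff_getElem?.mp hr
  rw [List.getElem?_modify] at hi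
  cases hdm : dm[i]? with
  | none => rw [hdm] at hi; simp at hi
  | some r0 =>
    rw [hdm] at hi
    simp only [Option.map_eq_map, Option.map_some] at hi
    have hr0 : r0 ∈ dm := List.mem_of_getElem? hdm
    have hru : r = (if y = i then r0.set x v else r0) := (Option.some.inj hi).symm
    by_cases hyi : y = i
    · rw [if_pos hyi] at hru
      rw [hru] at hu
      rcases List.mem_or_eq_of_mem_set hu with h' | h'
      · exact hinv r0 hr0 u h'
      · omega
    · rw [if_neg hyi] at hru
      rw [hru] at hu
      exact hinv r0 hr0 u hu

-- number of still-undiscovered (-1) cells: termination measure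
def pvCnt (dm : List (List Int)) : Nat :=
  (dm.map (fun r => r.count (-1))).sum

-- one neighbour (dy, dx) of the popped (y, x): the body of A's inner `for dy, dx in [...]`
def pvStepA1 (output : List String) (h w y x : Int)
    (st : List (List Int) × List (Int × Int)) (d : Int × Int) :
    List (List Int) × List (Int × Int) :=
  let ny := y + d.1
  let nx := x + d.2
  if 0 ≤ ny ∧ ny < h ∧ 0 ≤ nx ∧ nx < w ∧ pvCell output ny nx = some '.' ∧
      pvGet2 st.1 ny.toNat nx.toNat = some (-1) then
    (pvSet2 st.1 ny.toNat nx.toNat ((pvGet2 st.1 y.toNat x.toNat).getD (-1) + 1),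
     st.2 ++ [(ny, nx)])
  else st

def pvStepA (output : List String) (h w y x : Int)
    (st : List (List Int) × List (Int × Int)) : List (List Int) × List (Int × Int) :=
  pvNbrs.foldl (pvStepA1 output h w y x) st

-- termination bookkeeping for pvBfsA (cited by the port; the port's values are unchanged)
theorem pvRow_count_set (r : List Int) : ∀ (x : Nat) (v : Int), r[x]? = some (-1) → v ≠ -1 →
    (r.set x v).count (-1) + 1 = r.count (-1) := by
  induction r with
  | nil => intro x v h _; simp at h
  | cons a t ih =>
    intro x v h hv
    cases x with
    | zero =>
      simp at h
      subst h
      simp [hv]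
    | succ x' =>
      simp at h
      have := ih x' v h hv
      simp [List.count_cons]
      omega

theorem pvCnt_set2 (dm : List (List Int)) : ∀ (y x : Nat) (v : Int),
    pvGet2 dm y x = some (-1) → v ≠ -1 → pvCnt (pvSet2 dm y x v) + 1 = pvCnt dm := by
  induction dm with
  | nil => intro y x v h _; simp [pvGet2] at h
  | cons r t ih =>
    intro y x v h hv
    cases y with
    | zero =>
      simp [pvGet2] at h
      have := pvRow_count_set r x v h hv
      simp [pvSet2, pvCnt, List.modify]
      omega
    | succ y' =>
      simp [pvGet2] at h
      have := ih y' x v (by simpa [pvGet2] using h) hv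
      simp [pvSet2, pvCnt, List.modify_succ_cons] at this ⊢
      omega

theorem pvInvA_getD (dm : List (List Int)) (hinv : pvInvA dm) (y x : Nat) :
    -1 ≤ (pvGet2 dm y x).getD (-1) := by
  cases hg : pvGet2 dm y x with
  | none => simp
  | some u => simpa using pvInvA_get hinv hg

theorem pvStepA1_meas (output : List String) (h w y x : Int)
    (st : List (List Int) × List (Int × Int)) (d : Int × Int) (hinv : pvInvA st.1) :
    pvInvA (pvStepA1 output h w y x st d).1 ∧
      2 * pvCnt (pvStepA1 output h w y x st d).1 + (pvStepA1 output h w y x st d).2.length ≤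
        2 * pvCnt st.1 + st.2.length := by
  unfold pvStepA1
  dsimp only
  split_ifs with hc
  · obtain ⟨h1, h2, h3, h4, h5, h6⟩ := hc
    have hvA : -1 ≤ (pvGet2 st.1 y.toNat x.toNat).getD (-1) := pvInvA_getD _ hinv _ _
    have hvne : (pvGet2 st.1 y.toNat x.toNat).getD (-1) + 1 ≠ -1 := by omega
    constructor
    · exact pvInvA_set2 hinv (by omega)
    · have hcnt := pvCnt_set2 st.1 _ _ ((pvGet2 st.1 y.toNat x.toNat).getD (-1) + 1) h6 hvne
      simp only [List.length_append, List.length_cons, List.length_nil]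
      omega
  · exact ⟨hinv, le_refl _⟩

theorem pvFoldA1_meas (output : List String) (h w y x : Int) (ds : List (Int × Int)) :
    ∀ st : List (List Int) × List (Int × Int), pvInvA st.1 →
      pvInvA (ds.foldl (pvStepA1 output h w y x) st).1 ∧
      2 * pvCnt (ds.foldl (pvStepA1 output h w y x) st).1 +
        (ds.foldl (pvStepA1 output h w y x) st).2.length ≤ 2 * pvCnt st.1 + st.2.length := by
  induction ds with
  | nil => intro st hinv; exact ⟨hinv, le_refl _⟩
  | cons d ds ih =>
    intro st hinv
    rw [List.foldl_cons]
    have h1 := pvStepA1_meas output h w y x st d hinv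
    have h2 := ih (pvStepA1 output h w y x st d) h1.1
    exact ⟨h2.1, le_trans h2.2 h1.2⟩

theorem pvStepA_meas (output : List String) (h w y x : Int)
    (st : List (List Int) × List (Int × Int)) (hinv : pvInvA st.1) :
    pvInvA (pvStepA output h w y x st).1 ∧
      2 * pvCnt (pvStepA output h w y x st).1 + (pvStepA output h w y x st).2.length ≤
        2 * pvCnt st.1 + st.2.length :=
  pvFoldA1_meas output h w y x pvNbrs st hinv

-- the BFS while-loop: pop (y, x), relax its 4 neighbours, recurse on the grown queue.
-- The decidable invariant check always succeeds in a real run (pvInvA_init / pvStepA_meas):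
-- it only makes the recursion well-founded and changes no computed value.
def pvBfsA (output : List String) (h w : Int) (dm : List (List Int))
    (q : List (Int × Int)) : List (List Int) :=
  match q with
  | [] => dm
  | (y, x) :: rest =>
    if _hinv : ∀ r ∈ dm, ∀ v ∈ r, (-1 : Int) ≤ v then
      pvBfsA output h w (pvStepA output h w y x (dm, rest)).1
        (pvStepA output h w y x (dm, rest)).2
    else dm
termination_by 2 * pvCnt dm + q.length
decreasing_by
  have := (pvStepA_meas output h w y x (dm, rest) _hinv).2
  dsimp only at this ⊢
  simp only [List.length_cons] at *
  omega

def find_furthest_walkable_pair (output : List String) :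
    Option ((Int × Int) × (Int × Int) × Int) :=
  let height : Int := output.length
  let width : Int := pvWidth output
  let walkable := pvWalkable output
  ((PySem.List.enumerate walkable).foldl
    (fun (st : Option ((Int × Int) × (Int × Int) × Int) × Int) ip =>
      let i := ip.1
      let sy := ip.2.1
      let sx := ip.2.2
      -- dist_map = [[-1]*width for _ in range(height)]; dist_map[sy][sx] = 0
      let dm0 := pvSet2 (List.replicate height.toNat (List.replicate width.toNat (-1)))
        sy.toNat sx.toNat 0
      let dmF := pvBfsA output height width dm0 [(sy, sx)]
      -- for ey, ex in walkable[i+1:]: … (dist_map[ey][ex] is always in range: .getD default unreachable)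
      (PySem.List.slice walkable (some (i + 1)) none).foldl
        (fun st2 e =>
          let d := (pvGet2 dmF e.1.toNat e.2.toNat).getD (-1)
          if d > st2.2 then (some ((sy, sx), e, d), d) else st2) st)
    (none, -1)).1

-- ===== PORT B =====

-- one neighbour (ny, nx) of the frontier node (y, x): the body of B's inner `for (ny, nx) in (...)`
-- (dist[(y, x)] is always a present key when read in a real run; the getD default is unreachable)
def pvStepB1 (output : List String) (h w y x : Int)
    (st : PySem.Dict (Int × Int) Int × List (Int × Int)) (n : Int × Int) :
    PySem.Dict (Int × Int) Int × List (Int × Int) :=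
  if 0 ≤ n.1 ∧ n.1 < h ∧ 0 ≤ n.2 ∧ n.2 < w ∧ pvCell output n.1 n.2 = some '.' ∧
      st.1.contains (n.1, n.2) = false then
    (st.1.insert (n.1, n.2) (st.1.getD (y, x) (-1) + 1), st.2 ++ [(n.1, n.2)])
  else st

def pvStepB (output : List String) (h w y x : Int)
    (st : PySem.Dict (Int × Int) Int × List (Int × Int)) :
    PySem.Dict (Int × Int) Int × List (Int × Int) :=
  [(y - 1, x), (y + 1, x), (y, x - 1), (y, x + 1)].foldl (pvStepB1 output h w y x) st

-- walkable tiles (w.r.t. the bounds h, w) not yet discovered: termination measure for the level loop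
def pvRemB (output : List String) (h w : Int) (dist : PySem.Dict (Int × Int) Int) : Nat :=
  (pvWalkableHW output h w).countP (fun p => !(dist.contains p))

theorem pvMem_walkableHW {output : List String} {h w y x : Int} (h0 : 0 ≤ y) (h1 : y < h)
    (h2 : 0 ≤ x) (h3 : x < w) (hc : pvCell output y x = some '.') :
    (y, x) ∈ pvWalkableHW output h w := by
  unfold pvWalkableHW
  rw [List.mem_flatMap]
  refine ⟨y, PySem.List.mem_pyRange_one.mpr ⟨h0, h1⟩, ?_⟩
  rw [List.mem_map]
  exact ⟨x, List.mem_filter.mpr ⟨PySem.List.mem_pyRange_one.mpr ⟨h2, h3⟩, by simp [hc]⟩, rfl⟩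

theorem pvCountP_insert (L : List (Int × Int)) (d : PySem.Dict (Int × Int) Int)
    (p : Int × Int) (v : Int) (hp : p ∈ L) (hc : d.contains p = false) :
    L.countP (fun q => !((d.insert p v).contains q)) + 1 ≤
      L.countP (fun q => !(d.contains q)) := by
  obtain ⟨s, t, rfl⟩ := List.append_of_mem hp
  simp only [List.countP_append, List.countP_cons]
  have hmono : ∀ (l : List (Int × Int)),
      l.countP (fun q => !((d.insert p v).contains q)) ≤
        l.countP (fun q => !(d.contains q)) := by
    intro l
    apply List.countP_mono_left
    intro q _ hq
    simp only [PySem.Dict.contains_insert] at hq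
    simp only [Bool.not_eq_eq_eq_not, Bool.not_true, Bool.or_eq_false_iff] at hq
    simp [hq.2]
  have h1 := hmono s
  have h2 := hmono t
  have hp1 : (!((d.insert p v).contains p)) = false := by
    simp
  have hp2 : (!(d.contains p)) = true := by simp [hc]
  simp only [hp1, hp2, Bool.false_eq_true, if_false, if_true]
  omega

theorem pvStepB1_meas (output : List String) (h w y x : Int)
    (st : PySem.Dict (Int × Int) Int × List (Int × Int)) (n : Int × Int) :
    2 * pvRemB output h w (pvStepB1 output h w y x st n).1 +
        (pvStepB1 output h w y x st n).2.length ≤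
      2 * pvRemB output h w st.1 + st.2.length := by
  unfold pvStepB1
  split_ifs with hc
  · obtain ⟨h1, h2, h3, h4, h5, h6⟩ := hc
    have hmem : (n.1, n.2) ∈ pvWalkableHW output h w := pvMem_walkableHW h1 h2 h3 h4 h5
    have := pvCountP_insert (pvWalkableHW output h w) st.1 (n.1, n.2)
      (st.1.getD (y, x) (-1) + 1) hmem h6
    unfold pvRemB
    simp only [List.length_append, List.length_cons, List.length_nil]
    omega
  · exact le_refl _

theorem pvFoldB1_meas (output : List String) (h w y x : Int) (ds : List (Int × Int)) :
    ∀ st : PySem.Dict (Int × Int) Int × List (Int × Int),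
      2 * pvRemB output h w (ds.foldl (pvStepB1 output h w y x) st).1 +
          (ds.foldl (pvStepB1 output h w y x) st).2.length ≤
        2 * pvRemB output h w st.1 + st.2.length := by
  induction ds with
  | nil => intro st; exact le_refl _
  | cons d ds ih =>
    intro st
    rw [List.foldl_cons]
    exact le_trans (ih (pvStepB1 output h w y x st d)) (pvStepB1_meas output h w y x st d)

theorem pvFoldB_meas (output : List String) (h w : Int) (F : List (Int × Int)) :
    ∀ st : PySem.Dict (Int × Int) Int × List (Int × Int),
      2 * pvRemB output h w (F.foldl (fun st u => pvStepB output h w u.1 u.2 st) st).1 +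
        (F.foldl (fun st u => pvStepB output h w u.1 u.2 st) st).2.length ≤
      2 * pvRemB output h w st.1 + st.2.length := by
  induction F with
  | nil => intro st; exact le_refl _
  | cons p F ih =>
    intro st
    rw [List.foldl_cons]
    exact le_trans (ih (pvStepB output h w p.1 p.2 st))
      (pvFoldB1_meas output h w p.1 p.2 _ st)

-- the level loop: expand the whole frontier into the next one, recurse while nonempty
def pvLevelB (output : List String) (h w : Int) (dist : PySem.Dict (Int × Int) Int)
    (q : List (Int × Int)) : PySem.Dict (Int × Int) Int :=
  match q with
  | [] => dist
  | p :: rest =>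
    let st := ((p :: rest).foldl (fun st u => pvStepB output h w u.1 u.2 st) (dist, []))
    pvLevelB output h w st.1 st.2
termination_by 2 * pvRemB output h w dist + q.length
decreasing_by
  have := pvFoldB_meas output h w (p :: rest) (dist, [])
  simp only [List.length_cons, List.length_nil] at this ⊢
  omega

def find_furthest_walkable_pair_alt (output : List String) :
    Option ((Int × Int) × (Int × Int) × Int) :=
  let height : Int := output.length
  let width : Int := pvWidth output
  let walkable := pvWalkable output
  ((PySem.List.enumerate walkable).foldl
    (fun (st : Option ((Int × Int) × (Int × Int) × Int) × Int) ip =>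
      let i := ip.1
      let sy := ip.2.1
      let sx := ip.2.2
      -- dist = {(sy, sx): 0}; frontier = [(sy, sx)]; while frontier: …
      let distF := pvLevelB output height width
        (PySem.Dict.ofList [((sy, sx), (0 : Int))]) [(sy, sx)]
      -- for (ey, ex) in walkable[i+1:]: d = dist.get((ey, ex), -1); …
      (PySem.List.slice walkable (some (i + 1)) none).foldl
        (fun st2 e =>
          let d := distF.getD (e.1, e.2) (-1)
          if d > st2.2 then (some ((sy, sx), e, d), d) else st2) st)
    (none, -1)).1

-- ===== PRECONDITION & SPEC =====
-- Pre_ excludes exactly the inputs where the Python A raises: the empty grid (len(output[0])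
-- is an IndexError) and grids where some row is shorter than the first row (output[y][x]
-- raises IndexError for x < width).
def Pre_find_furthest_walkable_pair (output : List String) : Prop :=
  output ≠ [] ∧ ∀ r ∈ output, PySem.Str.len (output.headD "") ≤ PySem.Str.len r

instance (output : List String) : Decidable (Pre_find_furthest_walkable_pair output) := by
  unfold Pre_find_furthest_walkable_pair; infer_instance

def pvWitness_find_furthest_walkable_pair : List String := [".#.", "..#"]

def Spec_find_furthest_walkable_pair (output : List String)
    (out : Option ((Int × Int) × (Int × Int) × Int)) : Prop :=
  out = find_furthest_walkable_pair_alt output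

instance (output : List String) (out : Option ((Int × Int) × (Int × Int) × Int)) :
    Decidable (Spec_find_furthest_walkable_pair output out) := by
  unfold Spec_find_furthest_walkable_pair; infer_instance

-- ===== CLAIM (what is proved, stated in full; the proofs are below) =====
def Claim_equal_find_furthest_walkable_pair : Prop :=
  ∀ (output : List String), Dom_find_furthest_walkable_pair output →
    Pre_find_furthest_walkable_pair output →
    Spec_find_furthest_walkable_pair output (find_furthest_walkable_pair output)

-- ===== LEMMAS AND PROOFS =====

-- the initial dist_map ([[-1]*width …] with the source set to 0) satisfies the invariant
theorem pvInvA_init (H W sy sx : Nat) :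
    pvInvA (pvSet2 (List.replicate H (List.replicate W (-1))) sy sx 0) := by
  have hget : ∀ (y x : Nat) (v : Int),
      pvGet2 (pvSet2 (List.replicate H (List.replicate W (-1))) sy sx 0) y x = some v →
        -1 ≤ v := by
    intro y x v hv
    unfold pvGet2 pvSet2 at hv
    rw [List.getElem?_modify] at hv
    cases hbase : (List.replicate H (List.replicate W (-1 : Int)))[y]? with
    | none => rw [hbase] at hv; simp at hv
    | some r =>
      have hr : r = List.replicate W (-1) := by
        rw [List.getElem?_replicate] at hbase
        split at hbase
        · exact (Option.some.inj hbase).symm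
        · exact absurd hbase (by simp)
      subst hr
      rw [hbase] at hv
      by_cases hsy : sy = y
      · simp only [Option.map_eq_map, Option.map_some, Option.bind_some, if_pos hsy] at hv
        rw [List.getElem?_set] at hv
        split_ifs at hv with hxy hlt
        all_goals try (rw [List.getElem?_replicate] at hv; split at hv)
        all_goals try (have := Option.some.inj hv; omega)
        all_goals simp at hv
      · simp only [Option.map_eq_map, Option.map_some, Option.bind_some, if_neg hsy] at hv
        rw [List.getElem?_replicate] at hv
        split at hv
        · have := Option.some.inj hv
          omega
        · simp at hv
  intro r hr v hv
  obtain ⟨i, hi⟩ := List.mem_iff_getElem?.mp hr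
  obtain ⟨j, hj⟩ := List.mem_iff_getElem?.mp hv
  exact hget i j v (by unfold pvGet2; rw [hi]; simpa using hj)

theorem pvGet2_set2_self {dm : List (List Int)} {y x : Nat} (v : Int)
    (h : (pvGet2 dm y x).isSome) : pvGet2 (pvSet2 dm y x v) y x = some v := by
  unfold pvGet2 pvSet2 at *
  rw [List.getElem?_modify]
  cases hdm : dm[y]? with
  | none => rw [hdm] at h; simp at h
  | some r =>
    rw [hdm] at h
    simp only [Option.bind_some] at h
    simp only [Option.map_eq_map, Option.map_some, Option.bind_some]
    have hlt : x < r.length := by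
      by_contra hlt
      rw [List.getElem?_eq_none (by omega)] at h
      simp at h
    exact List.getElem?_set_self hlt

theorem pvGet2_set2_ne {dm : List (List Int)} {y x y' x' : Nat}
    (hne : (y', x') ≠ (y, x)) (v : Int) :
    pvGet2 (pvSet2 dm y x v) y' x' = pvGet2 dm y' x' := by
  unfold pvGet2 pvSet2
  rw [List.getElem?_modify]
  by_cases hy : y = y'
  · subst hy
    have hx : x ≠ x' := by
      intro hx; exact hne (by simp [hx])
    cases hdm : dm[y]? with
    | none => simp
    | some r => simp [List.getElem?_set_ne hx]
  · cases hdm : dm[y']? with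
    | none => simp
    | some r => simp [hy]

-- ---- the simulation invariant between A's dist_map and B's dist dict ----

def pvInR (h w : Int) (p : Int × Int) : Prop :=
  0 ≤ p.1 ∧ p.1 < h ∧ 0 ≤ p.2 ∧ p.2 < w

def pvShape (H W : Nat) (dm : List (List Int)) : Prop :=
  dm.length = H ∧ ∀ (i : Nat) (r : List Int), dm[i]? = some r → r.length = W

def pvRel (h w : Int) (dm : List (List Int)) (dist : PySem.Dict (Int × Int) Int) : Prop :=
  ∀ p : Int × Int, pvInR h w p → pvGet2 dm p.1.toNat p.2.toNat = some (dist.getD p (-1))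

def pvVals (dist : PySem.Dict (Int × Int) Int) : Prop :=
  ∀ p ∈ dist.items, (0 : Int) ≤ p.2

def pvCore (h w : Int) (dm : List (List Int)) (dist : PySem.Dict (Int × Int) Int) : Prop :=
  pvShape h.toNat w.toNat dm ∧ pvRel h w dm dist ∧ pvVals dist

theorem pvVals_getD_ge {d : PySem.Dict (Int × Int) Int} (hv : pvVals d) (k : Int × Int) :
    -1 ≤ d.getD k (-1) := by
  rw [PySem.Dict.getD_eq_get?_getD]
  cases hg : d.get? k with
  | none => simp
  | some v =>
    have := hv _ (PySem.Dict.mem_items_of_get?_eq_some d hg)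
    simp only [Option.getD_some]
    omega

theorem pvVals_neg_iff {d : PySem.Dict (Int × Int) Int} (hv : pvVals d) (k : Int × Int) :
    (d.getD k (-1) = -1 ↔ d.contains k = false) := by
  rw [PySem.Dict.getD_eq_get?_getD, PySem.Dict.contains_eq_isSome_get?]
  cases hg : d.get? k with
  | none => simp
  | some v =>
    have := hv _ (PySem.Dict.mem_items_of_get?_eq_some d hg)
    simp only [Option.getD_some, Option.isSome_some]
    constructor
    · intro hcon; omega
    · intro hcon; simp at hcon

theorem pvShape_set2 {H W : Nat} {dm : List (List Int)} (hs : pvShape H W dm)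
    (y x : Nat) (v : Int) : pvShape H W (pvSet2 dm y x v) := by
  constructor
  · unfold pvSet2
    rw [List.length_modify]
    exact hs.1
  · intro i r hr
    unfold pvSet2 at hr
    rw [List.getElem?_modify] at hr
    cases hdm : dm[i]? with
    | none => rw [hdm] at hr; simp at hr
    | some r0 =>
      rw [hdm] at hr
      simp only [Option.map_eq_map, Option.map_some] at hr
      have hru : r = (if y = i then r0.set x v else r0) := (Option.some.inj hr).symm
      by_cases hyi : y = i
      · rw [if_pos hyi] at hru
        rw [hru, List.length_set]
        exact hs.2 i r0 hdm
      · rw [if_neg hyi] at hru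
        rw [hru]
        exact hs.2 i r0 hdm

-- ---- one neighbour step preserves the simulation ----

theorem pvOne_sim (o : List String) (h w y x dy dx ny nx : Int)
    (hny : ny = y + dy) (hnx : nx = x + dx) (hyx : pvInR h w (y, x))
    (sA : List (List Int) × List (Int × Int))
    (sB : PySem.Dict (Int × Int) Int × List (Int × Int))
    (hq : sA.2 = sB.2) (hQ : ∀ p ∈ sA.2, pvInR h w p) (hC : pvCore h w sA.1 sB.1) :
    (pvStepA1 o h w y x sA (dy, dx)).2 = (pvStepB1 o h w y x sB (ny, nx)).2 ∧
    (∀ p ∈ (pvStepA1 o h w y x sA (dy, dx)).2, pvInR h w p) ∧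
    pvCore h w (pvStepA1 o h w y x sA (dy, dx)).1 (pvStepB1 o h w y x sB (ny, nx)).1 := by
  obtain ⟨hS, hR, hV⟩ := hC
  subst hny hnx
  by_cases hr : 0 ≤ y + dy ∧ y + dy < h ∧ 0 ≤ x + dx ∧ x + dx < w ∧
      pvCell o (y + dy) (x + dx) = some '.'
  case pos =>
    obtain ⟨h1, h2, h3, h4, h5⟩ := hr
    have hinr : pvInR h w (y + dy, x + dx) := ⟨h1, h2, h3, h4⟩
    have hrel := hR (y + dy, x + dx) hinr
    dsimp only at hrel
    have hyx' := hR (y, x) hyx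
    dsimp only at hyx'
    have hvaleq : (pvGet2 sA.1 y.toNat x.toNat).getD (-1) = sB.1.getD (y, x) (-1) := by
      rw [hyx']
      rfl
    by_cases hnew : sB.1.contains (y + dy, x + dx) = false
    · have hgetm1 : pvGet2 sA.1 (y + dy).toNat (x + dx).toNat = some (-1) := by
        rw [hrel, (pvVals_neg_iff hV _).mpr hnew]
      have eA : pvStepA1 o h w y x sA (dy, dx) =
          (pvSet2 sA.1 (y + dy).toNat (x + dx).toNat
            ((pvGet2 sA.1 y.toNat x.toNat).getD (-1) + 1), sA.2 ++ [(y + dy, x + dx)]) := by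
        unfold pvStepA1; dsimp only; rw [if_pos ⟨h1, h2, h3, h4, h5, hgetm1⟩]
      have eB : pvStepB1 o h w y x sB (y + dy, x + dx) =
          (sB.1.insert (y + dy, x + dx) (sB.1.getD (y, x) (-1) + 1),
            sB.2 ++ [(y + dy, x + dx)]) := by
        unfold pvStepB1; dsimp only; rw [if_pos ⟨h1, h2, h3, h4, h5, hnew⟩]
      rw [eA, eB]
      refine ⟨by rw [hq], ?_, ?_, ?_, ?_⟩
      · intro p hp
        rcases List.mem_append.mp hp with h' | h'
        · exact hQ p h'
        · have : p = (y + dy, x + dx) := by simpa using h'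
          rw [this]
          exact hinr
      · exact pvShape_set2 hS _ _ _
      · intro p hp
        by_cases hpe : p = (y + dy, x + dx)
        · subst hpe
          dsimp only
          rw [pvGet2_set2_self _ (by rw [hgetm1]; rfl)]
          rw [PySem.Dict.getD_insert, if_pos rfl, hvaleq]
        · obtain ⟨py, px⟩ := p
          obtain ⟨hp1, hp2, hp3, hp4⟩ := hp
          dsimp only at hp1 hp2 hp3 hp4 ⊢
          have hts : (py.toNat, px.toNat) ≠ ((y + dy).toNat, (x + dx).toNat) := by
            intro heq
            apply hpe
            have e1 := congrArg Prod.fst heq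
            have e2 := congrArg Prod.snd heq
            dsimp only at e1 e2
            have ey : py = y + dy := by omega
            have ex : px = x + dx := by omega
            rw [ey, ex]
          rw [pvGet2_set2_ne hts]
          rw [PySem.Dict.getD_insert, if_neg hpe]
          exact hR (py, px) ⟨hp1, hp2, hp3, hp4⟩
      · intro p hp
        rcases (PySem.Dict.mem_items_insert _ _ _ _).mp hp with h' | h'
        · rw [h']
          have := pvVals_getD_ge hV (y, x)
          dsimp only
          omega
        · exact hV p h'.1
    · have hgA : ¬ (pvGet2 sA.1 (y + dy).toNat (x + dx).toNat = some (-1)) := by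
        rw [hrel]
        intro hcon
        exact hnew ((pvVals_neg_iff hV (y + dy, x + dx)).mp (Option.some.inj hcon))
      have eA : pvStepA1 o h w y x sA (dy, dx) = sA := by
        unfold pvStepA1; dsimp only; rw [if_neg (fun hh => hgA hh.2.2.2.2.2)]
      have eB : pvStepB1 o h w y x sB (y + dy, x + dx) = sB := by
        unfold pvStepB1; dsimp only; rw [if_neg (fun hh => hnew hh.2.2.2.2.2)]
      rw [eA, eB]
      exact ⟨hq, hQ, hS, hR, hV⟩
  case neg =>
    have eA : pvStepA1 o h w y x sA (dy, dx) = sA := by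
      unfold pvStepA1; dsimp only
      rw [if_neg (fun hh => hr ⟨hh.1, hh.2.1, hh.2.2.1, hh.2.2.2.1, hh.2.2.2.2.1⟩)]
    have eB : pvStepB1 o h w y x sB (y + dy, x + dx) = sB := by
      unfold pvStepB1; dsimp only
      rw [if_neg (fun hh => hr ⟨hh.1, hh.2.1, hh.2.2.1, hh.2.2.2.1, hh.2.2.2.2.1⟩)]
    rw [eA, eB]
    exact ⟨hq, hQ, hS, hR, hV⟩

theorem pvStep_sim (o : List String) (h w y x : Int) (hyx : pvInR h w (y, x))
    (sA : List (List Int) × List (Int × Int))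
    (sB : PySem.Dict (Int × Int) Int × List (Int × Int))
    (hq : sA.2 = sB.2) (hQ : ∀ p ∈ sA.2, pvInR h w p) (hC : pvCore h w sA.1 sB.1) :
    (pvStepA o h w y x sA).2 = (pvStepB o h w y x sB).2 ∧
    (∀ p ∈ (pvStepA o h w y x sA).2, pvInR h w p) ∧
    pvCore h w (pvStepA o h w y x sA).1 (pvStepB o h w y x sB).1 := by
  unfold pvStepA pvStepB pvNbrs
  simp only [List.foldl_cons, List.foldl_nil]
  have e1 := pvOne_sim o h w y x (-1) 0 (y - 1) x (by ring) (by ring) hyx sA sB hq hQ hC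
  have e2 := pvOne_sim o h w y x 1 0 (y + 1) x (by ring) (by ring) hyx _ _ e1.1 e1.2.1 e1.2.2
  have e3 := pvOne_sim o h w y x 0 (-1) y (x - 1) (by ring) (by ring) hyx _ _ e2.1 e2.2.1 e2.2.2
  exact pvOne_sim o h w y x 0 1 y (x + 1) (by ring) (by ring) hyx _ _ e3.1 e3.2.1 e3.2.2

-- ---- whole-frontier fold preserves the simulation ----

theorem pvFold_sim (o : List String) (h w : Int) (F : List (Int × Int)) :
    ∀ (sA : List (List Int) × List (Int × Int))
      (sB : PySem.Dict (Int × Int) Int × List (Int × Int)),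
      sA.2 = sB.2 → (∀ p ∈ sA.2, pvInR h w p) → (∀ p ∈ F, pvInR h w p) →
      pvCore h w sA.1 sB.1 →
      (F.foldl (fun st u => pvStepA o h w u.1 u.2 st) sA).2 =
        (F.foldl (fun st u => pvStepB o h w u.1 u.2 st) sB).2 ∧
      (∀ p ∈ (F.foldl (fun st u => pvStepA o h w u.1 u.2 st) sA).2, pvInR h w p) ∧
      pvCore h w (F.foldl (fun st u => pvStepA o h w u.1 u.2 st) sA).1
        (F.foldl (fun st u => pvStepB o h w u.1 u.2 st) sB).1 := by
  induction F with
  | nil => intro sA sB hq hQ _ hC; exact ⟨hq, hQ, hC⟩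
  | cons p F ih =>
    intro sA sB hq hQ hF hC
    rw [List.foldl_cons, List.foldl_cons]
    have e := pvStep_sim o h w p.1 p.2 (by simpa using hF p (by simp)) sA sB hq hQ hC
    exact ih _ _ e.1 e.2.1 (fun u hu => hF u (by simp [hu])) e.2.2

-- ---- A's invariant and measure through a whole-frontier fold ----

theorem pvFoldA_meas (o : List String) (h w : Int) (F : List (Int × Int)) :
    ∀ st : List (List Int) × List (Int × Int), pvInvA st.1 →
      pvInvA (F.foldl (fun st u => pvStepA o h w u.1 u.2 st) st).1 ∧
      2 * pvCnt (F.foldl (fun st u => pvStepA o h w u.1 u.2 st) st).1 +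
          (F.foldl (fun st u => pvStepA o h w u.1 u.2 st) st).2.length ≤
        2 * pvCnt st.1 + st.2.length := by
  induction F with
  | nil => intro st hinv; exact ⟨hinv, le_refl _⟩
  | cons p F ih =>
    intro st hinv
    rw [List.foldl_cons]
    have h1 := pvStepA_meas o h w p.1 p.2 st hinv
    have h2 := ih (pvStepA o h w p.1 p.2 st) h1.1
    exact ⟨h2.1, le_trans h2.2 h1.2⟩

-- ---- FIFO scheduling: popping a block F of the queue equals folding over F ----

theorem pvFoldA1_acc (o : List String) (h w y x : Int) (ds : List (Int × Int)) :
    ∀ (dm : List (List Int)) (q : List (Int × Int)),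
      ds.foldl (pvStepA1 o h w y x) (dm, q) =
        ((ds.foldl (pvStepA1 o h w y x) (dm, [])).1,
          q ++ (ds.foldl (pvStepA1 o h w y x) (dm, [])).2) := by
  induction ds with
  | nil => intro dm q; simp
  | cons d ds ih =>
    intro dm q
    rw [List.foldl_cons, List.foldl_cons]
    by_cases hc : 0 ≤ y + d.1 ∧ y + d.1 < h ∧ 0 ≤ x + d.2 ∧ x + d.2 < w ∧
        pvCell o (y + d.1) (x + d.2) = some '.' ∧
        pvGet2 dm (y + d.1).toNat (x + d.2).toNat = some (-1)
    · have e1 : pvStepA1 o h w y x (dm, q) d =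
          (pvSet2 dm (y + d.1).toNat (x + d.2).toNat
            ((pvGet2 dm y.toNat x.toNat).getD (-1) + 1), q ++ [(y + d.1, x + d.2)]) := by
        unfold pvStepA1; dsimp only; rw [if_pos hc]
      have e2 : pvStepA1 o h w y x (dm, []) d =
          (pvSet2 dm (y + d.1).toNat (x + d.2).toNat
            ((pvGet2 dm y.toNat x.toNat).getD (-1) + 1), [(y + d.1, x + d.2)]) := by
        unfold pvStepA1; dsimp only; rw [if_pos hc]; rfl
      rw [e1, e2]
      rw [ih _ (q ++ [(y + d.1, x + d.2)]), ih _ [(y + d.1, x + d.2)]]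
      simp [List.append_assoc]
    · have e1 : pvStepA1 o h w y x (dm, q) d = (dm, q) := by
        unfold pvStepA1; dsimp only; rw [if_neg hc]
      have e2 : pvStepA1 o h w y x (dm, []) d = (dm, []) := by
        unfold pvStepA1; dsimp only; rw [if_neg hc]
      rw [e1, e2]
      exact ih dm q

theorem pvStepA_acc (o : List String) (h w y x : Int) (dm : List (List Int))
    (q : List (Int × Int)) :
    pvStepA o h w y x (dm, q) =
      ((pvStepA o h w y x (dm, [])).1, q ++ (pvStepA o h w y x (dm, [])).2) := by
  unfold pvStepA
  exact pvFoldA1_acc o h w y x pvNbrs dm q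

theorem pvFoldA_acc (o : List String) (h w : Int) (F : List (Int × Int)) :
    ∀ (dm : List (List Int)) (q : List (Int × Int)),
      F.foldl (fun st u => pvStepA o h w u.1 u.2 st) (dm, q) =
        ((F.foldl (fun st u => pvStepA o h w u.1 u.2 st) (dm, [])).1,
          q ++ (F.foldl (fun st u => pvStepA o h w u.1 u.2 st) (dm, [])).2) := by
  induction F with
  | nil => intro dm q; simp
  | cons p F ih =>
    intro dm q
    rw [List.foldl_cons, List.foldl_cons]
    rw [pvStepA_acc o h w p.1 p.2 dm q]
    rw [ih _ (q ++ (pvStepA o h w p.1 p.2 (dm, [])).2)]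
    conv_rhs => rw [← Prod.mk.eta (p := pvStepA o h w p.1 p.2 (dm, []))]
    rw [ih _ ((pvStepA o h w p.1 p.2 (dm, [])).2)]
    simp [List.append_assoc]

theorem pvBfsA_pops (o : List String) (h w : Int) (F : List (Int × Int)) :
    ∀ (N : List (Int × Int)) (dm : List (List Int)), pvInvA dm →
      pvBfsA o h w dm (F ++ N) =
        pvBfsA o h w (F.foldl (fun st u => pvStepA o h w u.1 u.2 st) (dm, [])).1
          (N ++ (F.foldl (fun st u => pvStepA o h w u.1 u.2 st) (dm, [])).2) := by
  induction F with
  | nil => intro N dm _; simp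
  | cons p F ih =>
    intro N dm h1
    obtain ⟨y, x⟩ := p
    rw [List.cons_append]
    rw [pvBfsA]
    rw [dif_pos (show ∀ r ∈ dm, ∀ v ∈ r, (-1 : Int) ≤ v from h1)]
    rw [pvStepA_acc o h w y x dm (F ++ N)]
    rw [List.append_assoc]
    rw [ih (N ++ (pvStepA o h w y x (dm, [])).2) (pvStepA o h w y x (dm, [])).1
      (pvStepA_meas o h w y x (dm, []) h1).1]
    rw [List.foldl_cons]
    conv_rhs => rw [← Prod.mk.eta (p := pvStepA o h w y x (dm, []))]
    conv_rhs => rw [pvFoldA_acc o h w F (pvStepA o h w y x (dm, [])).1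
      (pvStepA o h w y x (dm, [])).2]
    simp [List.append_assoc]

-- ---- main simulation: A's queue BFS and B's level BFS compute matching distances ----

theorem pvBfs_sim (o : List String) (h w : Int) (n : Nat) :
    ∀ (dm : List (List Int)) (dist : PySem.Dict (Int × Int) Int) (F : List (Int × Int)),
      2 * pvCnt dm + F.length ≤ n → pvInvA dm → (∀ p ∈ F, pvInR h w p) →
      pvCore h w dm dist →
      pvCore h w (pvBfsA o h w dm F) (pvLevelB o h w dist F) := by
  induction n using Nat.strong_induction_on with
  | _ n IH =>
    intro dm dist F hn hinv hF hC
    cases F with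
    | nil =>
      rw [pvBfsA, pvLevelB]
      exact hC
    | cons p F' =>
      have hsim := pvFold_sim o h w (p :: F') (dm, []) (dist, []) rfl (by simp) hF hC
      have hmeas := pvFoldA_meas o h w (p :: F') (dm, []) hinv
      have hpops := pvBfsA_pops o h w (p :: F') [] dm hinv
      rw [List.append_nil] at hpops
      rw [hpops, pvLevelB]
      rw [← hsim.1]
      have hb := hmeas.2
      simp only [List.length_nil, List.length_cons] at hb hn
      exact IH (2 * pvCnt (List.foldl (fun st u => pvStepA o h w u.1 u.2 st) (dm, []) (p :: F')).1 +
          (List.foldl (fun st u => pvStepA o h w u.1 u.2 st) (dm, []) (p :: F')).2.length)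
        (by omega) _ _ _ (le_refl _) hmeas.1 hsim.2.1 hsim.2.2

-- ---- the initial states of one source are in simulation ----

theorem pvInit_core (o : List String) (sy sx : Int)
    (hin : pvInR (o.length : Int) (pvWidth o) (sy, sx)) :
    pvCore (o.length : Int) (pvWidth o)
      (pvSet2 (List.replicate ((o.length : Int)).toNat
        (List.replicate ((pvWidth o)).toNat (-1))) sy.toNat sx.toNat 0)
      (PySem.Dict.ofList [((sy, sx), (0 : Int))]) := by
  obtain ⟨hsy0, hsyh, hsx0, hsxw⟩ := hin
  dsimp only at hsy0 hsyh hsx0 hsxw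
  have hd0 : PySem.Dict.ofList [((sy, sx), (0 : Int))] =
      PySem.Dict.empty.insert (sy, sx) 0 := rfl
  have hbase : ∀ (i j : Nat), i < ((o.length : Int)).toNat → j < ((pvWidth o)).toNat →
      pvGet2 (List.replicate ((o.length : Int)).toNat
        (List.replicate ((pvWidth o)).toNat (-1))) i j = some (-1) := by
    intro i j hi hj
    unfold pvGet2
    rw [List.getElem?_replicate, if_pos hi]
    simp only [Option.bind_some]
    rw [List.getElem?_replicate, if_pos hj]
  refine ⟨?_, ?_, ?_⟩
  · apply pvShape_set2
    constructor
    · exact List.length_replicate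
    · intro i r hr
      rw [List.getElem?_replicate] at hr
      split at hr
      · rw [← Option.some.inj hr]
        exact List.length_replicate
      · exact absurd hr (by simp)
  · intro p hp
    by_cases hpe : p = (sy, sx)
    · subst hpe
      dsimp only
      rw [pvGet2_set2_self 0 (by rw [hbase sy.toNat sx.toNat (by omega) (by omega)]; rfl)]
      rw [hd0, PySem.Dict.getD_insert, if_pos rfl]
    · obtain ⟨py, px⟩ := p
      obtain ⟨hp1, hp2, hp3, hp4⟩ := hp
      dsimp only at hp1 hp2 hp3 hp4 ⊢
      have hts : (py.toNat, px.toNat) ≠ (sy.toNat, sx.toNat) := by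
        intro heq
        apply hpe
        have e1 := congrArg Prod.fst heq
        have e2 := congrArg Prod.snd heq
        dsimp only at e1 e2
        have ey : py = sy := by omega
        have ex : px = sx := by omega
        rw [ey, ex]
      rw [pvGet2_set2_ne hts]
      rw [hbase py.toNat px.toNat (by omega) (by omega)]
      rw [hd0, PySem.Dict.getD_insert, if_neg hpe]
      rfl
  · intro p hp
    rw [hd0] at hp
    rcases (PySem.Dict.mem_items_insert _ _ _ _).mp hp with h' | h'
    · rw [h']
    · exact absurd h'.1 (by simp [PySem.Dict.empty])

-- ---- membership plumbing for the outer loops ----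

theorem pvWalkable_inR {o : List String} {p : Int × Int} (hp : p ∈ pvWalkable o) :
    pvInR (o.length : Int) (pvWidth o) p := by
  unfold pvWalkable pvWalkableHW at hp
  rw [List.mem_flatMap] at hp
  obtain ⟨y, hy, hp2⟩ := hp
  rw [List.mem_map] at hp2
  obtain ⟨x, hx, rfl⟩ := hp2
  have hy' := PySem.List.mem_pyRange_one.mp hy
  have hx' := PySem.List.mem_pyRange_one.mp (List.mem_filter.mp hx).1
  exact ⟨hy'.1, hy'.2, hx'.1, hx'.2⟩

theorem pvMem_slice {α : Type} {xs : List α} {a b : Option Int} {e : α}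
    (h : e ∈ PySem.List.slice xs a b) : e ∈ xs := by
  unfold PySem.List.slice at h
  exact List.mem_of_mem_drop (List.mem_of_mem_take h)

theorem pvMem_enumerate {α : Type} {xs : List α} {s : Int} {e : Int × α}
    (h : e ∈ PySem.List.enumerate xs s) : e.2 ∈ xs := by
  rw [← PySem.List.map_snd_enumerate xs s]
  exact List.mem_map_of_mem h

-- ---- the two ports agree ----

theorem pvPorts_eq (o : List String) :
    find_furthest_walkable_pair o = find_furthest_walkable_pair_alt o := by
  unfold find_furthest_walkable_pair find_furthest_walkable_pair_alt
  dsimp only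
  congr 1
  apply PySem.List.foldl_congr_mem
  intro acc ip hip
  have hsrc : ip.2 ∈ pvWalkable o := pvMem_enumerate hip
  have hin := pvWalkable_inR hsrc
  have hin' : pvInR (o.length : Int) (pvWidth o) (ip.2.1, ip.2.2) := hin
  try dsimp only
  apply PySem.List.foldl_congr_mem
  intro acc2 e he
  try dsimp only
  have hcore := pvBfs_sim o (o.length : Int) (pvWidth o)
    (2 * pvCnt (pvSet2 (List.replicate ((o.length : Int)).toNat
      (List.replicate ((pvWidth o)).toNat (-1))) ip.2.1.toNat ip.2.2.toNat 0) + 1)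
    _ _ [(ip.2.1, ip.2.2)] (le_refl _) (pvInvA_init _ _ _ _)
    (by
      intro p hp
      have hp' : p = (ip.2.1, ip.2.2) := by simpa using hp
      rw [hp']
      exact hin')
    (pvInit_core o ip.2.1 ip.2.2 hin')
  have hread := hcore.2.1 e (pvWalkable_inR (pvMem_slice he))
  simp only [hread, Option.getD_some, Prod.mk.eta]

-- ===== VERDICT (by name: the statement is the Claim_ definition above) =====
theorem find_furthest_walkable_pair_spec : Claim_equal_find_furthest_walkable_pair := by
  intro output _ _
  unfold Spec_find_furthest_walkable_pair
  exact pvPorts_eq output
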